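-- pv_equiv track=rewrite | github.com/Jan21/NeuralCDCL2 | neural_cdcl/masking.py | compute_loss_mask
-- ===== SOURCE A (Python) =====
-- from typing import List
--
-- READ_COMMANDS = {
--     "READ_ASSIGNMENTS",
--     "READ_CLAUSES",
--     "READ_DECISION_LEVELS",
--     "READ_LEVEL",
--     "READ_CONFLICT_CLAUSE",
--     "READ_REASON_CLAUSES",
--     "READ_LEARNED_CLAUSE",
-- }
--
-- def compute_loss_mask(tokens: List[str]) -> List[int]:
--     """
--     Compute loss mask for a token sequence.
--
--     Args:
--         tokens: List of whitespace-split tokens from a trace.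
--
--     Returns:
--         List of 0/1 values, same length as tokens.
--         0 = do NOT compute loss (masked), 1 = compute loss.
--     """
--     n = len(tokens)
--     mask = [1] * n
--
--     if n == 0:
--         return mask
--
--     # Rule 1: mask the first token
--     mask[0] = 0
--
--     # Rule 2: mask [...] content after READ_* commands
--     i = 0
--     while i < n:
--         if tokens[i] in READ_COMMANDS:
--             # The READ token itself stays unmasked (mask=1)
--             # Look for the following [ ... ]
--             j = i + 1
--             if j < n and tokens[j] == "[":
--                 depth = 0
--                 while j < n:
--                     if tokens[j] == "[":
--                         depth += 1
--                     elif tokens[j] == "]":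
--                         depth -= 1
--                     mask[j] = 0
--                     if depth == 0:
--                         break
--                     j += 1
--                 i = j + 1
--             else:
--                 i += 1
--         else:
--             i += 1
--
--     return mask
-- ===== SOURCE B (Python) =====
-- from typing import List
--
-- READ_COMMANDS = {
--     "READ_ASSIGNMENTS",
--     "READ_CLAUSES",
--     "READ_DECISION_LEVELS",
--     "READ_LEVEL",
--     "READ_CONFLICT_CLAUSE",
--     "READ_REASON_CLAUSES",
--     "READ_LEARNED_CLAUSE",
-- }
--
-- def compute_loss_mask(tokens: List[str]) -> List[int]:
--     """Flat single-pass state machine: depth counts open brackets being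
--     masked, armed means the previous top-level token was a READ command."""
--     if not tokens:
--         return []
--     mask = [0]
--     depth = 0
--     armed = tokens[0] in READ_COMMANDS
--     for tok in tokens[1:]:
--         if depth > 0:
--             mask.append(0)
--             if tok == "[":
--                 depth += 1
--             elif tok == "]":
--                 depth -= 1
--         elif armed and tok == "[":
--             mask.append(0)
--             depth = 1
--             armed = False
--         else:
--             mask.append(1)
--             armed = tok in READ_COMMANDS
--     return mask
-- ===== Notes on version B (the rewrite author's own statement) =====
-- stated objective: simpler
-- what changed: Replaced A's nested while-loops (outer index scan plus an inner bracket-scanning loop with index jumps) by a single flat for-loop over the tokens maintaining a depth counter and an 'armed' flag, building the mask by appending.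
import Mathlib
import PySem

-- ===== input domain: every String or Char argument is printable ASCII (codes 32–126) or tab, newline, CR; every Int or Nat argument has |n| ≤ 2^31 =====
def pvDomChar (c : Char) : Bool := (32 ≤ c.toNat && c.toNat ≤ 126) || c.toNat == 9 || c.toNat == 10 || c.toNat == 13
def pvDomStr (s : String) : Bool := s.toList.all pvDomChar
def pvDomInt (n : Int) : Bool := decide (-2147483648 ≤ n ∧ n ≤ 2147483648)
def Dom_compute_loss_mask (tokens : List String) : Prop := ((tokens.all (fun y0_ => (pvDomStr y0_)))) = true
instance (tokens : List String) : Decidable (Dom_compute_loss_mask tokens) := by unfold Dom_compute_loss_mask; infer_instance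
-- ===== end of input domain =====

-- B replaces A's nested bracket-scanning loops by one flat pass with a depth counter
-- and an "armed" flag (objective: simpler); same return value on every input.

-- module constant READ_COMMANDS (a set of string literals; membership test only)
def READ_COMMANDS : List String :=
  ["READ_ASSIGNMENTS", "READ_CLAUSES", "READ_DECISION_LEVELS", "READ_LEVEL",
   "READ_CONFLICT_CLAUSE", "READ_REASON_CLAUSES", "READ_LEARNED_CLAUSE"]

-- ===== PORT A =====
-- `tokens[i] in READ_COMMANDS`
def pvIsReadA (t : String) : Bool := READ_COMMANDS.contains t

-- A's two while-loops, transliterated as mutual structural recursion over the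
-- remaining tokens (rem = tokens[i:] resp. tokens[j:]); i/j and mask[...] = 0
-- via List.set are exactly A's index state.  innerScanA is the inner
-- `while j < n` loop; its `break` resumes the outer loop at i = j + 1.
mutual
def outerA : Nat → List Int → List String → List Int
  | _, mask, [] => mask
  | i, mask, t :: rest =>
    if pvIsReadA t then
      if rest.head? = some "[" then innerScanA (i + 1) 0 mask rest
      else outerA (i + 1) mask rest
    else outerA (i + 1) mask rest

def innerScanA : Nat → Int → List Int → List String → List Int
  | _, _, mask, [] => mask
  | j, depth, mask, t :: rest =>
    let depth' := if t == "[" then depth + 1 else if t == "]" then depth - 1 else depth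
    let mask' := mask.set j 0
    if depth' = 0 then outerA (j + 1) mask' rest
    else innerScanA (j + 1) depth' mask' rest
end

def compute_loss_mask (tokens : List String) : List Int :=
  let n := tokens.length
  let mask := List.replicate n 1
  if n = 0 then mask
  else outerA 0 (mask.set 0 0) tokens

-- ===== PORT B =====
-- loop body of B's single for-loop (state: mask built so far, depth, armed)
def stepB (st : List Int × Int × Bool) (tok : String) : List Int × Int × Bool :=
  let mask := st.1
  let depth := st.2.1
  let armed := st.2.2
  if depth > 0 then
    (mask ++ [0],
     (if tok == "[" then depth + 1 else if tok == "]" then depth - 1 else depth),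
     armed)
  else if armed && tok == "[" then (mask ++ [0], 1, false)
  else (mask ++ [1], 0, READ_COMMANDS.contains tok)

def compute_loss_mask_alt (tokens : List String) : List Int :=
  match tokens with
  | [] => []
  | t :: rest => (rest.foldl stepB ([0], 0, READ_COMMANDS.contains t)).1

-- ===== PRECONDITION & SPEC =====
def Spec_compute_loss_mask (tokens : List String) (out : List Int) : Prop := out = compute_loss_mask_alt tokens
instance (tokens : List String) (out : List Int) : Decidable (Spec_compute_loss_mask tokens out) := by unfold Spec_compute_loss_mask; infer_instance

-- ===== CLAIM (what is proved, stated in full; the proofs are below) =====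
def Claim_equal_compute_loss_mask : Prop := ∀ (tokens : List String), Dom_compute_loss_mask tokens → Spec_compute_loss_mask tokens (compute_loss_mask tokens)

-- ===== LEMMAS AND PROOFS =====

-- B's loop as structural recursion over the remaining tokens
def goFull : List String → Int → Bool → List Int
  | [], _, _ => []
  | t :: r, d, a =>
    if d > 0 then
      0 :: goFull r (if t == "[" then d + 1 else if t == "]" then d - 1 else d) a
    else if a && t == "[" then 0 :: goFull r 1 false
    else 1 :: goFull r 0 (READ_COMMANDS.contains t)

theorem foldl_stepB : ∀ (l : List String) (acc : List Int) (d : Int) (a : Bool),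
    (l.foldl stepB (acc, d, a)).1 = acc ++ goFull l d a := by
  intro l
  induction l with
  | nil => intro acc d a; simp [goFull]
  | cons t r ih =>
      intro acc d a
      simp only [List.foldl_cons, stepB, goFull]
      split_ifs <;> simp [ih]

-- a READ command is never the token "["
theorem isRead_ne_bracket (t : String) (h : pvIsReadA t = true) : t ≠ "[" := by
  intro he; subst he; simp [pvIsReadA, READ_COMMANDS] at h

theorem take_succ_set (m : List Int) (k : Nat) (hk : k < m.length) :
    (m.set k 0).take (k + 1) = m.take k ++ [0] := by
  rw [List.take_add_one, List.take_set_of_le le_rfl]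
  simp [hk]

theorem take_succ_one (m : List Int) (k : Nat) (hk : m[k]? = some 1) :
    m.take (k + 1) = m.take k ++ [1] := by
  rw [List.take_add_one, hk]; rfl

theorem mainAux (tokens : List String) :
    (∀ (i : Nat) (m : List Int) (armed : Bool),
       m.length = i + tokens.length →
       (∀ p, i ≤ p → p < m.length → m[p]? = some 1) →
       (armed = true → ¬ tokens.head? = some "[") →
       outerA i m tokens = m.take i ++ goFull tokens 0 armed)
    ∧
    (∀ (j : Nat) (d : Int) (m : List Int),
       m.length = j + tokens.length →
       (∀ p, j ≤ p → p < m.length → m[p]? = some 1) →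
       (1 ≤ d ∨ (d = 0 ∧ tokens.head? = some "[")) →
       innerScanA j d m tokens = m.take j ++ goFull tokens d (d == 0)) := by
  induction tokens with
  | nil =>
      constructor
      · intro i m armed hm _ _
        have hle : m.length ≤ i := by simp at hm; omega
        simp [outerA, goFull, List.take_of_length_le hle]
      · intro j d m hm _ _
        have hle : m.length ≤ j := by simp at hm; omega
        simp [innerScanA, goFull, List.take_of_length_le hle]
  | cons t rest ih =>
      obtain ⟨ihOut, ihInn⟩ := ih
      constructor
      · intro i m armed hm hones hC
        have hmi : m[i]? = some 1 := hones i le_rfl (by simp [hm])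
        rw [outerA]
        by_cases hr : pvIsReadA t = true
        · rw [if_pos hr]
          have htne : ¬ (armed && t == "[") = true := by
            simp only [Bool.and_eq_true, beq_iff_eq]
            rintro ⟨-, h⟩
            exact isRead_ne_bracket t hr h
          by_cases hbr : rest.head? = some "["
          · rw [if_pos hbr]
            rw [ihInn (i + 1) 0 m (by simp only [hm, List.length_cons]; omega)
                  (fun p h1 h2 => hones p (by omega) h2) (Or.inr ⟨rfl, hbr⟩)]
            rw [take_succ_one m i hmi]
            have hrB : decide (t ∈ READ_COMMANDS) = true := by simpa [pvIsReadA] using hr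
            simp [goFull, htne, hrB]
          · rw [if_neg hbr]
            rw [ihOut (i + 1) m (READ_COMMANDS.contains t) (by simp only [hm, List.length_cons]; omega)
                  (fun p h1 h2 => hones p (by omega) h2) (fun _ => hbr)]
            rw [take_succ_one m i hmi]
            simp [goFull, htne]
        · rw [if_neg hr]
          have hrB : READ_COMMANDS.contains t = false := eq_false_of_ne_true hr
          have htne : ¬ (armed && t == "[") = true := by
            simp only [Bool.and_eq_true, beq_iff_eq]
            rintro ⟨ha, h⟩
            exact hC ha (by simp [h])
          rw [ihOut (i + 1) m (READ_COMMANDS.contains t) (by simp only [hm, List.length_cons]; omega)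
                (fun p h1 h2 => hones p (by omega) h2) (by rw [hrB]; intro h; cases h)]
          rw [take_succ_one m i hmi]
          simp [goFull, htne]
      · intro j d m hm hones hd
        have hjlt : j < m.length := by simp [hm]
        have hones1 : ∀ p, j + 1 ≤ p → p < (m.set j 0).length →
            (m.set j 0)[p]? = some 1 := by
          intro p h1 h2
          rw [List.getElem?_set_ne (by omega)]
          exact hones p (by omega) (by simpa using h2)
        have hset : (m.set j 0).take (j + 1) = m.take j ++ [0] :=
          take_succ_set m j hjlt
        have hmset : (m.set j 0).length = (j + 1) + rest.length := by
          simp only [List.length_set, hm, List.length_cons]; omega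
        rw [innerScanA]
        rcases hd with hd1 | ⟨hd0, hh⟩
        · -- depth ≥ 1: we are inside the brackets
          have hgpos : (0 : Int) < d := by omega
          have hdne : (d == (0 : Int)) = false := by simp; omega
          by_cases hbl : t = "["
          · have h1 : ¬ (d + 1 = 0) := by omega
            have e1 : ((d + 1 : Int) == 0) = false := by simp; omega
            simp only [hbl, BEq.rfl, if_true, if_neg h1]
            rw [ihInn (j + 1) (d + 1) (m.set j 0) hmset hones1 (Or.inl (by omega))]
            rw [hset, e1]
            simp [goFull, hgpos, hdne]
          · by_cases hbr2 : t = "]"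
            · by_cases hone : d = 1
              · -- "]" at depth 1: break, outer loop resumes at j + 1
                subst hone
                have hsb : (("]" : String) == "[") = false := by decide
                have hsb2 : (("]" : String) == "]") = true := by decide
                simp only [hbr2, hsb, hsb2, Bool.false_eq_true, if_false, if_true]
                norm_num
                rw [ihOut (j + 1) (m.set j 0) false hmset hones1 (by intro h; cases h)]
                rw [hset]
                simp [goFull]
              · have h1 : ¬ (d - 1 = 0) := by omega
                have e1 : ((d - 1 : Int) == 0) = false := by simp; omega
                have hsb : (("]" : String) == "[") = false := by decide
                have hsb2 : (("]" : String) == "]") = true := by decide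
                simp only [hbr2, hsb, hsb2, Bool.false_eq_true, if_false, if_true,
                  if_neg h1]
                rw [ihInn (j + 1) (d - 1) (m.set j 0) hmset hones1 (Or.inl (by omega))]
                rw [hset, e1]
                simp [goFull, hgpos, hdne, hsb]
            · have h1 : ¬ (d = 0) := by omega
              have hbne : ¬ ((t == "[") = true) := by simpa using hbl
              have hbne2 : ¬ ((t == "]") = true) := by simpa using hbr2
              simp only [if_neg hbne, if_neg hbne2, if_neg h1]
              rw [ihInn (j + 1) d (m.set j 0) hmset hones1 (Or.inl (by omega))]
              rw [hset, hdne]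
              simp only [goFull, if_pos hgpos, if_neg hbne, if_neg hbne2]
              simp
        · -- entry: depth 0 and the current token is "[" (armed flag set on B's side)
          subst hd0
          have ht : t = "[" := by simpa using hh
          have h1 : ¬ ((0 : Int) + 1 = 0) := by omega
          have e1 : (((0 : Int) + 1) == 0) = false := by decide
          simp only [ht, BEq.rfl, if_true, if_neg h1]
          rw [ihInn (j + 1) (0 + 1) (m.set j 0) hmset hones1 (Or.inl (by omega))]
          rw [hset, e1]
          simp [goFull]

-- ===== VERDICT (by name: the statement is the Claim_ definition above) =====
theorem compute_loss_mask_spec : Claim_equal_compute_loss_mask := by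
  intro tokens _dom
  unfold Spec_compute_loss_mask
  cases tokens with
  | nil => rfl
  | cons t rest =>
      obtain ⟨ihOut, ihInn⟩ := mainAux rest
      have htake1 : ((List.replicate (rest.length + 1) (1 : Int)).set 0 0).take 1
          = [0] := by
        rw [take_succ_set _ 0 (by simp)]
        simp
      have hm0 : ((List.replicate (rest.length + 1) (1 : Int)).set 0 0).length
          = 1 + rest.length := by
        simp; omega
      have hones1 : ∀ p, 1 ≤ p →
          p < ((List.replicate (rest.length + 1) (1 : Int)).set 0 0).length →
          ((List.replicate (rest.length + 1) (1 : Int)).set 0 0)[p]? = some 1 := by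
        intro p h1 h2
        rw [List.getElem?_set_ne (by omega)]
        simp only [List.length_set, List.length_replicate] at h2
        simp only [List.getElem?_replicate]
        rw [if_pos h2]
      simp only [compute_loss_mask, compute_loss_mask_alt, List.length_cons,
        Nat.succ_ne_zero, if_false, foldl_stepB]
      rw [outerA]
      by_cases hr : pvIsReadA t = true
      · rw [if_pos hr]
        have hrB : decide (t ∈ READ_COMMANDS) = true := by simpa [pvIsReadA] using hr
        by_cases hbr : rest.head? = some "["
        · rw [if_pos hbr]
          rw [show (0 + 1) = 1 from rfl, ihInn 1 0 _ hm0 hones1 (Or.inr ⟨rfl, hbr⟩)]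
          rw [htake1]
          simp [hrB]
        · rw [if_neg hbr]
          rw [show (0 + 1) = 1 from rfl, ihOut 1 _ (READ_COMMANDS.contains t) hm0 hones1 (fun _ => hbr)]
          rw [htake1]
      · rw [if_neg hr]
        have hrB : READ_COMMANDS.contains t = false := eq_false_of_ne_true hr
        rw [show (0 + 1) = 1 from rfl, ihOut 1 _ (READ_COMMANDS.contains t) hm0 hones1 (by rw [hrB]; intro h; cases h)]
        rw [htake1]
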